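-- pv_equiv track=rewrite | github.com/UKPLab/acl2024-dapr | dapr/utils.py | concat_and_chunk
-- ===== SOURCE A (Python) =====
-- from itertools import chain
-- from typing import (
--     Any,
--     Callable,
--     Dict,
--     Iterable,
--     Iterator,
--     List,
--     Optional,
--     Tuple,
--     Type,
--     TypeVar,
-- )
--
-- T = TypeVar("T")
--
-- def concat_and_chunk(
--     sequences: Iterable[List[T]], marked: Iterable[bool], chunk_size: int
-- ) -> Iterator[Tuple[List[T], bool]]:
--     sequences_concatenated = list(chain(*sequences))
--     marked_broadcasted = list(
--         chain(*map(lambda args: [args[1]] * len(sequences[args[0]]), enumerate(marked)))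
--     )
--
--     for b in range(0, len(sequences_concatenated), chunk_size):
--         e = b + chunk_size
--         yield sequences_concatenated[b:e], any(marked_broadcasted[b:e])
-- ===== SOURCE B (Python) =====
-- def concat_and_chunk(sequences, marked, chunk_size):
--     # single streaming pass: no concatenated copy, no broadcast mark list
--     buf = []
--     has_mark = False
--     for i, seq in enumerate(sequences):
--         mark = marked[i] if i < len(marked) else False
--         for x in seq:
--             buf.append(x)
--             has_mark = has_mark or mark
--             if len(buf) == chunk_size:
--                 yield buf, has_mark
--                 buf = []
--                 has_mark = False
--     if buf:
--         yield buf, has_mark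
-- ===== Notes on version B (the rewrite author's own statement) =====
-- stated objective: alternative
-- what changed: B replaces A's materialize-everything approach (concatenate all sequences, build a broadcast mark list, then slice both by a range loop) with a single streaming pass that keeps a growing buffer and a running has_mark flag and emits a chunk whenever the buffer fills.
-- outside the precondition, e.g. on concat_and_chunk([[1, 2]], [True], -1): A returns [], B returns [([1, 2], True)]
import Mathlib
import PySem

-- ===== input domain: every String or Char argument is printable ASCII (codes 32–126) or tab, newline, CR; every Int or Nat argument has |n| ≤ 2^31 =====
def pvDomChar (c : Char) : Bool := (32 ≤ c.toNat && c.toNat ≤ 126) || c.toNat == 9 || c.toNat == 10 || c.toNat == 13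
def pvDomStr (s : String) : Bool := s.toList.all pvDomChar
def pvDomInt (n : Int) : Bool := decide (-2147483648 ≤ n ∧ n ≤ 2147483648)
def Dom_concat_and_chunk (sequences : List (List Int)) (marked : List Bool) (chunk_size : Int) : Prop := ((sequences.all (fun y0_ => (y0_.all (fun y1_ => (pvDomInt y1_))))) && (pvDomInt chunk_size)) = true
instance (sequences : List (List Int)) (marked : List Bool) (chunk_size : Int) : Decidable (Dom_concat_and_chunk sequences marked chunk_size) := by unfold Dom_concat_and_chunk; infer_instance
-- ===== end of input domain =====

-- B replaces A's concatenate-then-broadcast-then-slice scheme with a single streaming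
-- pass over the sequences keeping a buffer and a running has_mark flag (alternative
-- decomposition, same asymptotic cost).


-- ===== PORT A =====
def concat_and_chunk (sequences : List (List Int)) (marked : List Bool) (chunk_size : Int) : List (List Int × Bool) :=
  let sequences_concatenated := sequences.flatten
  let marked_broadcasted :=
    (PySem.List.enumerate marked).flatMap
      (fun args => List.replicate (PySem.List.pyGetD sequences args.1 []).length args.2)
  (PySem.List.pyRange 0 (sequences_concatenated.length : Int) chunk_size).map
    (fun b =>
      let e := b + chunk_size
      (PySem.List.slice sequences_concatenated (some b) (some e),
       (PySem.List.slice marked_broadcasted (some b) (some e)).any id))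

-- ===== PORT B =====
def concat_and_chunk_alt (sequences : List (List Int)) (marked : List Bool) (chunk_size : Int) : List (List Int × Bool) :=
  let st :=
    (PySem.List.enumerate sequences).foldl
      (fun (acc : List (List Int × Bool) × List Int × Bool) p =>
        let mark := if p.1 < (marked.length : Int) then PySem.List.pyGetD marked p.1 false else false
        p.2.foldl
          (fun (acc2 : List (List Int × Bool) × List Int × Bool) x =>
            let buf := acc2.2.1 ++ [x]
            let has_mark := acc2.2.2 || mark
            if (buf.length : Int) = chunk_size then (acc2.1 ++ [(buf, has_mark)], ([] : List Int), false)
            else (acc2.1, buf, has_mark)) acc)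
      ([], [], false)
  if st.2.1.isEmpty then st.1 else st.1 ++ [(st.2.1, st.2.2)]

-- ===== PRECONDITION & SPEC =====
-- Pre_ excludes the inputs on which A raises (chunk_size == 0: ValueError from range;
-- marked longer than sequences: IndexError from sequences[i]) and negative chunk_size,
-- a degenerate corner on which A's empty yield is an accident of range's negative-step
-- semantics while B's single full chunk is as defensible.
def Pre_concat_and_chunk (sequences : List (List Int)) (marked : List Bool) (chunk_size : Int) : Prop :=
  marked.length ≤ sequences.length ∧ 1 ≤ chunk_size
instance (sequences : List (List Int)) (marked : List Bool) (chunk_size : Int) : Decidable (Pre_concat_and_chunk sequences marked chunk_size) := by unfold Pre_concat_and_chunk; infer_instance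
def pvWitness_concat_and_chunk : List (List Int) × List Bool × Int := ([[1, 2], [3]], ([true, false], 2))

def Spec_concat_and_chunk (sequences : List (List Int)) (marked : List Bool) (chunk_size : Int) (out : List (List Int × Bool)) : Prop := out = concat_and_chunk_alt sequences marked chunk_size
instance (sequences : List (List Int)) (marked : List Bool) (chunk_size : Int) (out : List (List Int × Bool)) : Decidable (Spec_concat_and_chunk sequences marked chunk_size out) := by unfold Spec_concat_and_chunk; infer_instance

-- ===== CLAIM (what is proved, stated in full; the proofs are below) =====
def Claim_equal_concat_and_chunk : Prop := ∀ (sequences : List (List Int)) (marked : List Bool) (chunk_size : Int), Dom_concat_and_chunk sequences marked chunk_size → Pre_concat_and_chunk sequences marked chunk_size → Spec_concat_and_chunk sequences marked chunk_size (concat_and_chunk sequences marked chunk_size)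

-- ===== LEMMAS AND PROOFS =====

-- the stream of elements paired with their (padded) marks
def pvPairs (sequences : List (List Int)) (marked : List Bool) : List (Int × Bool) :=
  (sequences.zip (marked ++ List.replicate (sequences.length - marked.length) false)).flatMap
    (fun p => p.1.map (fun x => (x, p.2)))

-- canonical chunking of the pair stream into chunks of size k+1
def chunksP (k : Nat) : List (Int × Bool) → List (List Int × Bool)
  | [] => []
  | y :: t =>
      (((y :: t).take (k+1)).map Prod.fst, ((y :: t).take (k+1)).any Prod.snd)
        :: chunksP k (t.drop k)
termination_by ys => ys.length
decreasing_by simp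

def pvStep (cs : Int) (acc : List (List Int × Bool) × List Int × Bool) (y : Int × Bool) :
    List (List Int × Bool) × List Int × Bool :=
  let buf := acc.2.1 ++ [y.1]
  let has_mark := acc.2.2 || y.2
  if (buf.length : Int) = cs then (acc.1 ++ [(buf, has_mark)], ([] : List Int), false)
  else (acc.1, buf, has_mark)

def pvFinal (st : List (List Int × Bool) × List Int × Bool) : List (List Int × Bool) :=
  if st.2.1.isEmpty then st.1 else st.1 ++ [(st.2.1, st.2.2)]

lemma chunksP_ne_nil (k : Nat) (l : List (Int × Bool)) (h : l ≠ []) :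
    chunksP k l = ((l.take (k+1)).map Prod.fst, (l.take (k+1)).any Prod.snd) :: chunksP k (l.drop (k+1)) := by
  cases l with
  | nil => exact absurd rfl h
  | cons y t =>
    conv_lhs => rw [chunksP]
    simp

lemma foldB_inv (k : Nat) :
    ∀ (ys : List (Int × Bool)) (out : List (List Int × Bool)) (bp : List (Int × Bool)),
      bp.length ≤ k →
      pvFinal (ys.foldl (pvStep ((k : Int) + 1)) (out, bp.map Prod.fst, bp.any Prod.snd))
        = out ++ chunksP k (bp ++ ys) := by
  intro ys
  induction ys with
  | nil =>
    intro out bp hbp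
    simp only [List.foldl_nil, List.append_nil]
    cases bp with
    | nil => simp [pvFinal, chunksP]
    | cons b t =>
      have hlen : t.length + 1 ≤ k := by simpa using hbp
      rw [chunksP_ne_nil k _ (by simp)]
      rw [List.take_of_length_le (by simp; omega), List.drop_eq_nil_of_le (by simp; omega)]
      simp [pvFinal, chunksP]
  | cons y t ih =>
    intro out bp hbp
    rw [List.foldl_cons]
    by_cases hbk : bp.length = k
    · have hstep : pvStep ((k : Int) + 1) (out, bp.map Prod.fst, bp.any Prod.snd) y
          = (out ++ [((bp ++ [y]).map Prod.fst, (bp ++ [y]).any Prod.snd)],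
             ([] : List (Int × Bool)).map Prod.fst, ([] : List (Int × Bool)).any Prod.snd) := by
        simp [pvStep, hbk]
      rw [hstep, ih (out ++ [((bp ++ [y]).map Prod.fst, (bp ++ [y]).any Prod.snd)]) [] (by simp)]
      rw [chunksP_ne_nil k (bp ++ y :: t) (by simp)]
      rw [List.take_append, List.take_of_length_le (by omega), List.drop_append,
          List.drop_eq_nil_of_le (by omega)]
      have h1 : k + 1 - bp.length = 1 := by omega
      simp [h1, List.append_assoc]
    · have hstep : pvStep ((k : Int) + 1) (out, bp.map Prod.fst, bp.any Prod.snd) y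
          = (out, (bp ++ [y]).map Prod.fst, (bp ++ [y]).any Prod.snd) := by
        simp [pvStep]
        omega
      rw [hstep, ih out (bp ++ [y]) (by simp; omega)]
      simp [List.append_assoc]
lemma enum_map_g {α β : Type} (g : Int → β) :
    ∀ (l : List α) (n : Nat),
      (PySem.List.enumerate l (n : Int)).map (fun p => (p.2, g p.1))
        = l.zip ((List.range l.length).map (fun j => g ((n + j : Nat) : Int))) := by
  intro l
  induction l with
  | nil => intro n; simp [PySem.List.enumerate_nil]
  | cons x t ih =>
    intro n
    rw [PySem.List.enumerate_cons]
    have h1 : ((n : Int) + 1) = ((n + 1 : Nat) : Int) := by push_cast; ring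
    simp only [List.map_cons, h1, ih (n + 1)]
    rw [List.length_cons, List.range_succ_eq_map]
    simp only [List.map_cons, List.map_map, List.zip_cons_cons]
    congr 1
    apply congrArg
    apply List.map_congr_left
    intro a _
    simp [Function.comp]
    congr 1
    omega
lemma map_getD_range_eq_take {α : Type} (l : List α) (d : α) (m : Nat) (h : m ≤ l.length) :
    (List.range m).map (fun j => l.getD j d) = l.take m := by
  apply List.ext_getElem
  · simp [h]
  · intro i h1 h2
    simp at h1 h2 ⊢
    rw [List.getElem?_eq_getElem (by omega)]
    simp
lemma mpad_eq (sequences : List (List Int)) (marked : List Bool) (h : marked.length ≤ sequences.length) :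
    (List.range sequences.length).map (fun j => marked.getD j false)
      = marked ++ List.replicate (sequences.length - marked.length) false := by
  apply List.ext_getElem
  · simp; omega
  · intro i h1 h2
    simp at h1
    rcases lt_or_ge i marked.length with hi | hi
    · rw [List.getElem_append_left (by simpa using hi)]
      simp [List.getD_eq_getElem?_getD, List.getElem?_eq_getElem (by simpa using hi)]
    · rw [List.getElem_append_right (by simpa using hi)]
      simp [List.getD_eq_getElem?_getD, List.getElem?_eq_none_iff.mpr (by simpa using hi)]
lemma pyRange_pos_cons (n cs : Int) (hcs : 0 < cs) (hn : 0 < n) :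
    PySem.List.pyRange 0 n cs = 0 :: (PySem.List.pyRange 0 (n - cs) cs).map (fun b => cs + b) := by
  rw [PySem.List.pyRange_of_pos _ _ hcs, PySem.List.pyRange_of_pos _ _ hcs]
  have key : ((n - 0 + cs - 1) / cs).toNat
      = (if 0 < n - cs then ((n - cs - 0 + cs - 1) / cs).toNat else 0) + 1 := by
    have e1 : n - 0 + cs - 1 = (n - 1) + 1 * cs := by ring
    have e2 : (n - 1 + 1 * cs) / cs = (n - 1) / cs + 1 := Int.add_mul_ediv_right _ _ (by omega)
    have hnn : 0 ≤ (n - 1) / cs := Int.ediv_nonneg (by omega) (by omega)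
    by_cases hc : 0 < n - cs
    · have e3 : n - cs - 0 + cs - 1 = n - 1 := by ring
      rw [e3, if_pos hc, e1, e2]
      omega
    · have h0 : (n - 1) / cs = 0 := Int.ediv_eq_zero_of_lt (by omega) (by omega)
      rw [if_neg hc, e1, e2, h0]
      simp
  rw [if_pos hn, key, List.range_succ_eq_map]
  simp [List.map_map, Function.comp]
  intro a _
  ring
lemma pyRange_nonpos (b cs : Int) (hcs : 0 < cs) (hb : b ≤ 0) :
    PySem.List.pyRange 0 b cs = [] := by
  rw [PySem.List.pyRange_of_pos _ _ hcs]
  simp [show ¬ (0 < b) by omega]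
lemma slice_map_comm {α β : Type} (f : α → β) (l : List α) (a b : Int) (ha : 0 ≤ a) (hb : 0 ≤ b) :
    PySem.List.slice (l.map f) (some a) (some b) = (PySem.List.slice l (some a) (some b)).map f := by
  rw [PySem.List.slice_toNat _ ha hb, PySem.List.slice_toNat _ ha hb, List.map_take, List.map_drop]

lemma any_slice_pad (xs tail : List Bool) (ht : ∀ x ∈ tail, x = false) (a b : Int)
    (ha : 0 ≤ a) (hb : 0 ≤ b) :
    (PySem.List.slice (xs ++ tail) (some a) (some b)).any id
      = (PySem.List.slice xs (some a) (some b)).any id := by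
  rw [PySem.List.slice_toNat _ ha hb, PySem.List.slice_toNat _ ha hb,
      List.drop_append, List.take_append, List.any_append]
  have h0 : (List.take (b.toNat - a.toNat - (List.drop a.toNat xs).length)
      (List.drop (a.toNat - xs.length) tail)).any id = false := by
    rw [List.any_eq_false]
    intro x hx
    have := ht x (List.mem_of_mem_drop (List.mem_of_mem_take hx))
    simp [this]
  rw [h0]
  simp

lemma slice_shift (k : Nat) (xs : List (Int × Bool)) (b : Int) (hb : 0 ≤ b) :
    PySem.List.slice xs (some (((k : Int) + 1) + b)) (some ((((k : Int) + 1) + b) + ((k : Int) + 1)))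
      = PySem.List.slice (xs.drop (k + 1)) (some b) (some (b + ((k : Int) + 1))) := by
  rw [PySem.List.slice_toNat _ (by omega) (by omega), PySem.List.slice_toNat _ hb (by omega),
      List.drop_drop]
  congr 1
  · omega
  · congr 1
    omega
lemma rangeChunks (k : Nat) (xs : List (Int × Bool)) :
    (PySem.List.pyRange 0 (xs.length : Int) ((k : Int) + 1)).map
      (fun b => ((PySem.List.slice xs (some b) (some (b + ((k : Int) + 1)))).map Prod.fst,
                 (PySem.List.slice xs (some b) (some (b + ((k : Int) + 1)))).any Prod.snd))
      = chunksP k xs := by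
  have hcs : (0 : Int) < (k : Int) + 1 := by omega
  suffices H : ∀ (n : Nat) (xs : List (Int × Bool)), xs.length ≤ n →
      (PySem.List.pyRange 0 (xs.length : Int) ((k : Int) + 1)).map
        (fun b => ((PySem.List.slice xs (some b) (some (b + ((k : Int) + 1)))).map Prod.fst,
                   (PySem.List.slice xs (some b) (some (b + ((k : Int) + 1)))).any Prod.snd))
        = chunksP k xs by
    exact H xs.length xs le_rfl
  intro n
  induction n with
  | zero =>
    intro xs h
    have hx : xs = [] := List.eq_nil_of_length_eq_zero (by omega)
    subst hx
    rw [pyRange_nonpos _ _ hcs (by simp)]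
    simp [chunksP]
  | succ n ih =>
    intro xs hlen
    cases xs with
    | nil =>
      rw [pyRange_nonpos _ _ hcs (by simp)]
      simp [chunksP]
    | cons y t =>
      rw [pyRange_pos_cons _ _ hcs (by exact_mod_cast Nat.cast_pos.mpr (Nat.succ_pos t.length)),
          List.map_cons, List.map_map]
      rw [chunksP_ne_nil k _ (by simp)]
      congr 1
      · have h0 : PySem.List.slice (y :: t) (some 0) (some (0 + ((k : Int) + 1)))
            = (y :: t).take (k + 1) := by
          rw [PySem.List.slice_toNat _ le_rfl (by omega)]
          have : ((0 : Int) + ((k : Int) + 1)).toNat - (0 : Int).toNat = k + 1 := by omega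
          rw [this]
          simp
        rw [h0]
      · rcases le_or_gt (k + 1) (t.length + 1) with hge | hlt
        · have hcast : ((y :: t).length : Int) - ((k : Int) + 1) = (((t.drop k).length : Nat) : Int) := by
            simp only [List.length_cons, List.length_drop]
            push_cast
            omega
          rw [hcast]
          have hpt : ∀ b ∈ PySem.List.pyRange 0 (((t.drop k).length : Nat) : Int) ((k : Int) + 1),
              ((fun b => ((PySem.List.slice (y :: t) (some b) (some (b + ((k : Int) + 1)))).map Prod.fst,
                 (PySem.List.slice (y :: t) (some b) (some (b + ((k : Int) + 1)))).any Prod.snd)) ∘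
                  (fun b => ((k : Int) + 1) + b)) b
              = (fun b => ((PySem.List.slice (t.drop k) (some b) (some (b + ((k : Int) + 1)))).map Prod.fst,
                 (PySem.List.slice (t.drop k) (some b) (some (b + ((k : Int) + 1)))).any Prod.snd)) b := by
            intro b hb
            have hb0 : 0 ≤ b := by
              have := (PySem.List.mem_pyRange_iff_of_pos hcs b).mp hb
              omega
            have hsh := slice_shift k (y :: t) b hb0
            have hdt : (y :: t).drop (k + 1) = t.drop k := by simp
            simp only [Function.comp]
            rw [hsh, hdt]
          have hl' : t.length ≤ n := by
            simp only [List.length_cons] at hlen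
            omega
          rw [List.map_congr_left hpt, ih (t.drop k) (by simp only [List.length_drop]; omega)]
          have hdt2 : (y :: t).drop (k + 1) = t.drop k := by simp
          rw [hdt2]
        · have h1 : ((y :: t).length : Int) - ((k : Int) + 1) ≤ 0 := by simp; omega
          rw [pyRange_nonpos _ _ hcs h1]
          have h2 : (y :: t).drop (k + 1) = [] := List.drop_eq_nil_of_le (by simp; omega)
          rw [h2]
          simp [chunksP]
lemma altB_eq (sequences : List (List Int)) (marked : List Bool) (cs : Int)
    (h : marked.length ≤ sequences.length) :
    concat_and_chunk_alt sequences marked cs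
      = pvFinal ((pvPairs sequences marked).foldl (pvStep cs) ([], [], false)) := by
  unfold concat_and_chunk_alt pvFinal pvPairs
  have step1 :
      (fun (acc : List (List Int × Bool) × List Int × Bool) (p : Int × List Int) =>
        let mark := if p.1 < (marked.length : Int) then PySem.List.pyGetD marked p.1 false else false
        p.2.foldl
          (fun (acc2 : List (List Int × Bool) × List Int × Bool) x =>
            let buf := acc2.2.1 ++ [x]
            let has_mark := acc2.2.2 || mark
            if (buf.length : Int) = cs then (acc2.1 ++ [(buf, has_mark)], ([] : List Int), false)
            else (acc2.1, buf, has_mark)) acc)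
      = (fun acc p =>
          (((fun q : List Int × Bool => q.1.map (fun x => (x, q.2)))
              ((p.2, if p.1 < (marked.length : Int) then PySem.List.pyGetD marked p.1 false else false))).foldl
            (pvStep cs) acc)) := by
    funext acc p
    show _ = ((p.2.map (fun x => (x, if p.1 < (marked.length : Int) then PySem.List.pyGetD marked p.1 false else false))).foldl (pvStep cs) acc)
    rw [List.foldl_map]
    rfl
  rw [step1]
  rw [← List.foldl_map (f := fun p : Int × List Int => (p.2, if p.1 < (marked.length : Int) then PySem.List.pyGetD marked p.1 false else false))
        (g := fun acc (q : List Int × Bool) => (q.1.map (fun x => (x, q.2))).foldl (pvStep cs) acc)]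
  have e0 : (0 : Int) = ((0 : Nat) : Int) := by norm_cast
  rw [e0, enum_map_g (fun i => if i < (marked.length : Int) then PySem.List.pyGetD marked i false else false) sequences 0]
  have hm : (List.range sequences.length).map
        (fun j => if ((0 + j : Nat) : Int) < (marked.length : Int) then PySem.List.pyGetD marked ((0 + j : Nat) : Int) false else false)
      = marked ++ List.replicate (sequences.length - marked.length) false := by
    rw [← mpad_eq sequences marked h]
    apply List.map_congr_left
    intro j _
    simp only [Nat.zero_add, PySem.List.pyGetD_natCast]
    by_cases hj : j < marked.length
    · rw [if_pos (by exact_mod_cast hj)]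
    · rw [if_neg (by simp; omega), List.getD_eq_default _ _ (by omega)]
  rw [hm, ← List.foldl_flatMap]

lemma portA_eq (sequences : List (List Int)) (marked : List Bool) (cs : Int) (k : Nat)
    (h : marked.length ≤ sequences.length) (hk : cs = (k : Int) + 1) :
    concat_and_chunk sequences marked cs = chunksP k (pvPairs sequences marked) := by
  unfold concat_and_chunk
  have hcs : (0 : Int) < cs := by omega
  set pairs := pvPairs sequences marked with hpairs
  set tail := ((sequences.drop marked.length).zip
      (List.replicate (sequences.length - marked.length) false)).flatMap
      (fun p => List.replicate p.1.length p.2) with htaildef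
  have hsc : sequences.flatten = pairs.map Prod.fst := by
    rw [hpairs]
    unfold pvPairs
    rw [List.map_flatMap]
    have hmapfst : ∀ p : List Int × Bool, (p.1.map (fun x => (x, p.2))).map Prod.fst = p.1 := by
      intro p
      rw [List.map_map]
      simp [Function.comp_def]
    simp only [hmapfst]
    rw [List.flatMap_def, List.map_fst_zip (by simp; omega)]
  have htail : ∀ x ∈ tail, x = false := by
    intro x hx
    rw [htaildef] at hx
    obtain ⟨p, hp, hxp⟩ := List.mem_flatMap.mp hx
    have := (List.of_mem_zip hp).2
    have hfalse := List.eq_of_mem_replicate this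
    have hx2 := List.eq_of_mem_replicate hxp
    rw [hx2, hfalse]
  have hmb : pairs.map Prod.snd
      = (PySem.List.enumerate marked).flatMap
          (fun args => List.replicate (PySem.List.pyGetD sequences args.1 []).length args.2) ++ tail := by
    rw [hpairs]
    unfold pvPairs
    rw [List.map_flatMap]
    have hmapsnd : ∀ p : List Int × Bool,
        (p.1.map (fun x => (x, p.2))).map Prod.snd = List.replicate p.1.length p.2 := by
      intro p
      rw [List.map_map]
      simp [Function.comp_def]
    simp only [hmapsnd]
    conv_lhs => rw [← List.take_append_drop marked.length sequences]
    rw [List.zip_append (by simp [List.length_take]; omega), List.flatMap_append]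
    congr 1
    have hflm : (PySem.List.enumerate marked).flatMap
          (fun args => List.replicate (PySem.List.pyGetD sequences args.1 []).length args.2)
        = ((PySem.List.enumerate marked).map
            (fun q => (q.2, PySem.List.pyGetD sequences q.1 []))).flatMap
            (fun r => List.replicate r.2.length r.1) := by
      rw [List.flatMap_map]
    rw [hflm]
    have e0 : (0 : Int) = ((0 : Nat) : Int) := by norm_cast
    rw [e0, enum_map_g (fun i => PySem.List.pyGetD sequences i []) marked 0]
    have htake : (List.range marked.length).map
          (fun j => PySem.List.pyGetD sequences (((0 + j : Nat)) : Int) [])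
        = sequences.take marked.length := by
      rw [← map_getD_range_eq_take sequences [] marked.length h]
      apply List.map_congr_left
      intro j _
      simp [PySem.List.pyGetD_natCast]
    rw [htake, ← List.zip_swap (sequences.take marked.length) marked, List.flatMap_map]
    rfl
    rw [List.take_append_drop]
  subst hk
  rw [hsc]
  simp only [List.length_map]
  have hpt : ∀ b ∈ PySem.List.pyRange 0 ((pairs.length : Nat) : Int) ((k : Int) + 1),
      (fun b =>
        ((PySem.List.slice (pairs.map Prod.fst) (some b) (some (b + ((k : Int) + 1)))),
         (PySem.List.slice ((PySem.List.enumerate marked).flatMap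
            (fun args => List.replicate (PySem.List.pyGetD sequences args.1 []).length args.2))
            (some b) (some (b + ((k : Int) + 1)))).any id)) b
      = (fun b =>
          ((PySem.List.slice pairs (some b) (some (b + ((k : Int) + 1)))).map Prod.fst,
           (PySem.List.slice pairs (some b) (some (b + ((k : Int) + 1)))).any Prod.snd)) b := by
    intro b hb
    have hb0 : 0 ≤ b := by
      have := (PySem.List.mem_pyRange_iff_of_pos hcs b).mp hb
      omega
    have he0 : 0 ≤ b + ((k : Int) + 1) := by omega
    simp only
    congr 1
    · rw [slice_map_comm _ _ _ _ hb0 he0]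
    · rw [← any_slice_pad _ tail htail _ _ hb0 he0, ← hmb,
          slice_map_comm _ _ _ _ hb0 he0, List.any_map]
      rfl
  rw [List.map_congr_left hpt]
  exact rangeChunks k pairs

-- ===== VERDICT (by name: the statement is the Claim_ definition above) =====
theorem concat_and_chunk_spec : Claim_equal_concat_and_chunk := by
  intro sequences marked chunk_size _ hpre
  obtain ⟨h1, h2⟩ := hpre
  have hk : chunk_size = ((chunk_size.toNat - 1 : Nat) : Int) + 1 := by omega
  unfold Spec_concat_and_chunk
  rw [portA_eq sequences marked chunk_size _ h1 hk,
      altB_eq sequences marked chunk_size h1, hk]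
  have := foldB_inv (chunk_size.toNat - 1) (pvPairs sequences marked) [] []
    (by simp)
  simpa using this.symm
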